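-- pv_equiv track=rewrite | github.com/Kilian-S/DynamicStochasticSA | simulated_annealing.py | is_flow_conservation
-- ===== SOURCE A (Python) =====
-- def is_flow_conservation(tours: list[list[any]]) -> bool:
--     """
--     Check if the flow conservation condition is satisfied in the given tours.
--
--     Args:
--         tours (list[list[any]]): The list of tours.
--
--     Returns:
--         bool: True if the flow conservation condition is satisfied, False otherwise.
--
--     """
--
--     visit_counts = {node_id: 0 for tour in tours for node_id in tour}
--
--     for tour in tours:
--         for node_id in tour:
--             visit_counts[node_id] += 1
--
--     for node_id, count in visit_counts.items():
--         if count != 1 and node_id != '0':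
--             return False
--
--     return True
-- ===== SOURCE B (Python) =====
-- def is_flow_conservation(tours: list[list[any]]) -> bool:
--     seen = set()
--     for tour in tours:
--         for node_id in tour:
--             if node_id in seen and node_id != '0':
--                 return False
--             seen.add(node_id)
--     return True
-- ===== Notes on version B (the rewrite author's own statement) =====
-- stated objective: simpler
-- what changed: Replaces the build-a-count-dict-then-scan-its-items approach (three passes over the data) with a single early-exit pass that keeps a set of already-seen nodes and returns False at the first repeated non-'0' node.
import Mathlib
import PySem

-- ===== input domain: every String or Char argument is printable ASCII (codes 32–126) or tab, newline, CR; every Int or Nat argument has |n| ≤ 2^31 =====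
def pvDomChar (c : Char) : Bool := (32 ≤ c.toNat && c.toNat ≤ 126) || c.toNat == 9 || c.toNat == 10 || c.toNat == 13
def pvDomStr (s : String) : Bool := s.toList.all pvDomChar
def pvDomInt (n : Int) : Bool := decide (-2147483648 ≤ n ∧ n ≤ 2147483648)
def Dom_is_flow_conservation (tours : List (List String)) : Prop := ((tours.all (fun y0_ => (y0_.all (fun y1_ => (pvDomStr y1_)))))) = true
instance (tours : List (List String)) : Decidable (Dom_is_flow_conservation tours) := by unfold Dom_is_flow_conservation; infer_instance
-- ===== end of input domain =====

-- B replaces A's count-dict-then-scan with a single early-exit pass over a seen-set (simpler).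

-- ===== PORT A =====
-- the final 'for node_id, count in visit_counts.items(): if …: return False' loop
def checkItems : List (String × Int) → Bool
  | [] => true
  | (k, c) :: rest => if c != 1 && k != "0" then false else checkItems rest

def is_flow_conservation (tours : List (List String)) : Bool :=
  -- visit_counts = {node_id: 0 for tour in tours for node_id in tour}
  let d0 : PySem.Dict String Int :=
    tours.foldl (fun d tour => tour.foldl (fun d x => d.insert x 0) d) PySem.Dict.empty
  -- visit_counts[node_id] += 1  (the key is always present here, so 'modify x 0 (· + 1)' is exact)
  let d1 :=
    tours.foldl (fun d tour => tour.foldl (fun d x => d.modify x 0 (· + 1)) d) d0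
  checkItems d1.items

-- ===== PORT B =====
-- inner 'for node_id in tour' loop: none = the early 'return False'
def scanTour : PySem.Set String → List String → Option (PySem.Set String)
  | seen, [] => some seen
  | seen, x :: rest =>
    if PySem.Set.contains seen x && x != "0" then none
    else scanTour (PySem.Set.add seen x) rest

-- outer 'for tour in tours' loop
def scanTours : PySem.Set String → List (List String) → Bool
  | _, [] => true
  | seen, t :: ts =>
    match scanTour seen t with
    | none => false
    | some seen' => scanTours seen' ts

def is_flow_conservation_alt (tours : List (List String)) : Bool :=
  scanTours PySem.Set.empty tours

-- ===== PRECONDITION & SPEC =====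
def Spec_is_flow_conservation (tours : List (List String)) (out : Bool) : Prop := out = is_flow_conservation_alt tours
instance (tours : List (List String)) (out : Bool) : Decidable (Spec_is_flow_conservation tours out) := by unfold Spec_is_flow_conservation; infer_instance

-- ===== CLAIM (what is proved, stated in full; the proofs are below) =====
def Claim_equal_is_flow_conservation : Prop := ∀ (tours : List (List String)), Dom_is_flow_conservation tours → Spec_is_flow_conservation tours (is_flow_conservation tours)

-- ===== LEMMAS AND PROOFS =====

-- nested fold over tours = fold over the flattened node list
theorem foldl_nested_eq_flatten {α : Type} (f : α → String → α) (tours : List (List String)) (a : α) :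
    tours.foldl (fun d tour => tour.foldl f d) a = (tours.flatMap (fun t => t)).foldl f a := by
  induction tours generalizing a with
  | nil => rfl
  | cons t ts ih => simp [List.foldl_append, ih]

-- the comprehension dict has value 0 everywhere
theorem getD_init_zero (xs : List String) (d : PySem.Dict String Int)
    (h : ∀ v, d.getD v 0 = 0) (v : String) :
    (xs.foldl (fun d x => d.insert x 0) d).getD v 0 = 0 := by
  induction xs generalizing d with
  | nil => exact h v
  | cons x r ih =>
    simp only [List.foldl_cons]
    exact ih _ (fun w => by rw [PySem.Dict.getD_insert]; split <;> simp [h])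

theorem checkItems_true_iff (l : List (String × Int)) :
    checkItems l = true ↔ ∀ p ∈ l, p.2 = 1 ∨ p.1 = "0" := by
  induction l with
  | nil => simp [checkItems]
  | cons p rest ih =>
    obtain ⟨k, c⟩ := p
    simp only [checkItems]
    split <;> simp_all <;> tauto

-- A's value characterized on the flattened node list
theorem portA_true_iff (tours : List (List String)) :
    is_flow_conservation tours = true ↔
      ∀ k ∈ tours.flatMap (fun t => t), (tours.flatMap (fun t => t)).count k = 1 ∨ k = "0" := by
  unfold is_flow_conservation
  simp only [foldl_nested_eq_flatten]
  set xs := tours.flatMap (fun t => t) with hxs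
  set d0 : PySem.Dict String Int := xs.foldl (fun d x => d.insert x 0) PySem.Dict.empty with hd0
  set d1 : PySem.Dict String Int := xs.foldl (fun d x => d.modify x 0 (· + 1)) d0 with hd1
  have hkeys0 : d0.keys = PySem.Set.ofList xs := by
    rw [hd0, PySem.Dict.keys_foldl_insert]
    simp [PySem.Set.update_nil_left]
  have hkeys : d1.keys = PySem.Set.ofList xs := by
    rw [hd1, PySem.Dict.keys_foldl_modify, hkeys0, PySem.Set.update_eq_append_filter]
    have hnil : (PySem.Set.ofList xs).filter
        (fun y => !(PySem.Set.contains (PySem.Set.ofList xs) y)) = [] := by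
      apply List.filter_eq_nil_iff.mpr
      intro y hy
      simp only [(PySem.Set.contains_iff _ _).mpr hy, Bool.not_true]
      simp
    rw [hnil, List.append_nil]
  have hnodup : d1.keys.Nodup := by rw [hkeys]; exact PySem.Set.nodup_ofList xs
  have hgetD : ∀ v, d1.getD v 0 = (xs.count v : Int) := by
    intro v
    rw [hd1, PySem.Dict.getD_foldl_modify_add_one, hd0,
        getD_init_zero xs PySem.Dict.empty (fun v => PySem.Dict.getD_empty v 0)]
    ring
  rw [checkItems_true_iff, PySem.Dict.items_eq_map_keys d1 hnodup 0, List.forall_mem_map, hkeys]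
  constructor
  · intro h k hk
    have := h k ((PySem.Set.mem_ofList xs k).mpr hk)
    dsimp only at this
    rcases this with h1 | h0
    · left; rw [hgetD k] at h1; exact_mod_cast h1
    · right; exact h0
  · intro h k hk
    have := h k ((PySem.Set.mem_ofList xs k).mp hk)
    dsimp only
    rcases this with h1 | h0
    · left; rw [hgetD k]; exact_mod_cast h1
    · right; exact h0

-- the proof-side single pass B reduces to
def scanList : PySem.Set String → List String → Bool
  | _, [] => true
  | seen, x :: rest =>
    if PySem.Set.contains seen x && x != "0" then false
    else scanList (PySem.Set.add seen x) rest

theorem scanList_append (t r : List String) (s : PySem.Set String) :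
    scanList s (t ++ r) = match scanTour s t with
      | none => false
      | some s' => scanList s' r := by
  induction t generalizing s with
  | nil => rfl
  | cons x tl ih =>
    simp only [List.cons_append, scanList, scanTour]
    split <;> simp [ih]

theorem scanTours_eq_scanList (tours : List (List String)) (s : PySem.Set String) :
    scanTours s tours = scanList s (tours.flatMap (fun t => t)) := by
  induction tours generalizing s with
  | nil => rfl
  | cons t ts ih =>
    rw [List.flatMap_cons, scanList_append]
    show scanTours s (t :: ts) = _
    simp only [scanTours]
    cases h : scanTour s t with
    | none => rfl
    | some s' => exact ih s'

theorem scanList_true_iff (xs : List String) (s : PySem.Set String) :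
    scanList s xs = true ↔
      ((xs.filter (fun x => x ≠ "0")).Nodup ∧ ∀ x ∈ xs, x ≠ "0" → x ∉ s) := by
  induction xs generalizing s with
  | nil => simp [scanList]
  | cons x r ih =>
    simp only [scanList]
    by_cases h0 : x = "0"
    · subst h0
      rw [if_neg (by simp), ih]
      constructor
      · rintro ⟨hn, hs⟩
        refine ⟨by simpa using hn, ?_⟩
        intro y hy hne hmem
        rcases List.mem_cons.mp hy with rfl | hy'
        · exact absurd rfl hne
        · exact hs y hy' hne ((PySem.Set.mem_add _ _ _).mpr (Or.inl hmem))
      · rintro ⟨hn, hs⟩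
        refine ⟨by simpa using hn, fun y hy hne hmem => ?_⟩
        rcases (PySem.Set.mem_add _ _ _).mp hmem with h | rfl
        · exact hs y (by simp [hy]) hne h
        · exact hne rfl
    · rw [show (x != "0") = true by simp [h0], Bool.and_true]
      by_cases hs : x ∈ s
      · rw [if_pos (by simpa using (PySem.Set.contains_iff s x).mpr hs)]
        constructor
        · intro h'; cases h'
        · rintro ⟨-, hall⟩; exact absurd hs (hall x (by simp) h0)
      · rw [if_neg (by simp [(PySem.Set.contains_iff s x)]; exact hs), ih]
        rw [List.filter_cons, if_pos (by simpa using h0)]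
        constructor
        · rintro ⟨hn, hall⟩
          refine ⟨List.nodup_cons.mpr ⟨?_, hn⟩, ?_⟩
          · intro hmem
            have hxr : x ∈ r := (List.mem_filter.mp hmem).1
            have := hall x hxr h0
            rw [PySem.Set.mem_add] at this
            exact this (Or.inr rfl)
          · intro y hy hne hmem
            rcases List.mem_cons.mp hy with rfl | hy'
            · exact hs hmem
            · have := hall y hy' hne
              rw [PySem.Set.mem_add] at this
              exact this (Or.inl hmem)
        · rintro ⟨hn, hall⟩
          rcases List.nodup_cons.mp hn with ⟨hxf, hn'⟩
          refine ⟨hn', fun y hy hne hmem => ?_⟩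
          rcases (PySem.Set.mem_add _ _ _).mp hmem with h | rfl
          · exact hall y (by simp [hy]) hne h
          · exact hxf (List.mem_filter.mpr ⟨hy, by simpa using hne⟩)

-- the two characterizations agree
theorem count_one_iff_filter_nodup (xs : List String) :
    (∀ k ∈ xs, xs.count k = 1 ∨ k = "0") ↔ (xs.filter (fun x => x ≠ "0")).Nodup := by
  rw [List.nodup_iff_count_le_one]
  constructor
  · intro h a
    by_cases ha : a ∈ xs.filter (fun x => x ≠ "0")
    · rcases List.mem_filter.mp ha with ⟨hmem, hne⟩
      rcases h a hmem with h1 | h0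
      · rw [List.count_filter (by simpa using hne), h1]
      · exact absurd h0 (by simpa using hne)
    · rw [List.count_eq_zero_of_not_mem ha]; omega
  · intro h k hk
    by_cases h0 : k = "0"
    · right; exact h0
    · left
      have hcf : (xs.filter (fun x => x ≠ "0")).count k = xs.count k :=
        List.count_filter (by simpa using h0)
      have h1 : xs.count k ≤ 1 := by rw [← hcf]; exact h k
      have h2 : 1 ≤ xs.count k := List.one_le_count_iff.mpr hk
      omega

-- ===== VERDICT (by name: the statement is the Claim_ definition above) =====
theorem is_flow_conservation_spec : Claim_equal_is_flow_conservation := by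
  intro tours _
  show is_flow_conservation tours = is_flow_conservation_alt tours
  unfold is_flow_conservation_alt
  rw [scanTours_eq_scanList, Bool.eq_iff_iff, portA_true_iff, scanList_true_iff,
      count_one_iff_filter_nodup]
  constructor
  · intro h
    exact ⟨h, by simp [PySem.Set.empty]⟩
  · rintro ⟨h, -⟩
    exact h
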